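-- pv_equiv track=rewrite | github.com/KatsuJinCode/RE3 | harness/retokenizers.py | b1a_camelcase_pairs
-- ===== SOURCE A (Python) =====
-- def b1a_camelcase_pairs(text: str) -> str:
--     """
--     B1a: CamelCase merge (pairs) - deterministic every-other-pair.
--
--     "the quick brown fox" -> "theQuick brownFox"
--     """
--     words = text.split()
--     result = []
--     i = 0
--     while i < len(words):
--         if i + 1 < len(words):
--             # Merge this word with next, capitalizing the second
--             merged = words[i] + words[i + 1].capitalize()
--             result.append(merged)
--             i += 2
--         else:
--             result.append(words[i])
--             i += 1
--     return ' '.join(result)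
-- ===== SOURCE B (Python) =====
-- def b1a_camelcase_pairs(text: str) -> str:
--     out = []
--     for i, w in enumerate(text.split()):
--         if i % 2:
--             out[-1] += w.capitalize()
--         else:
--             out.append(w)
--     return ' '.join(out)
-- ===== Notes on version B (the rewrite author's own statement) =====
-- stated objective: idiomatic
-- what changed: Replaces A's index-strided while loop that looks ahead and consumes two words per step with a single enumerate-driven pass that appends even-indexed words and merges each odd-indexed word (capitalized) into the last output token.
import Mathlib
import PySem

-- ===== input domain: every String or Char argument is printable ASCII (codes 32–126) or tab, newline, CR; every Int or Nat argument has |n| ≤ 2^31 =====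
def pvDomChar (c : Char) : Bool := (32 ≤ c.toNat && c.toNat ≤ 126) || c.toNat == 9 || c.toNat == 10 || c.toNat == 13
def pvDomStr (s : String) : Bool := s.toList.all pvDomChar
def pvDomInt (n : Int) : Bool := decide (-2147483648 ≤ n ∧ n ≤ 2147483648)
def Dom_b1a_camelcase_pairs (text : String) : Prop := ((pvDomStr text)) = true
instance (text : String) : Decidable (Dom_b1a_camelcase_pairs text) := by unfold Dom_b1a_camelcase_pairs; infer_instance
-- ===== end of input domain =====

-- B replaces A's index-strided two-at-a-time while loop by a single enumerate fold that
-- merges each odd-indexed word into the last output token (objective: idiomatic one-pass form).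

-- str.capitalize(): first char titlecased, rest lowercased; exact on the ASCII domain
-- (titlecase = uppercase for ASCII letters).  Used by both Pythons, kept as a shared helper.
def pvCap (cs : List Char) : List Char :=
  match cs with
  | [] => []
  | c :: t => PySem.Chars.upper [c] ++ PySem.Chars.lower t

-- ===== PORT A =====
-- A's while loop over index i: consumes two words when i+1 < len(words), else one.
def pvALoop : List String → List String
  | [] => []
  | [w] => [w]
  | a :: b :: t => String.ofList (a.toList ++ pvCap b.toList) :: pvALoop t

def b1a_camelcase_pairs (text : String) : String :=
  PySem.Str.join " " (pvALoop (PySem.Str.split₀ text))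

-- ===== PORT B =====
-- loop body: `out[-1] += w.capitalize()` when i is odd (out is then nonempty), else `out.append(w)`
def pvBStep (out : List String) (iw : Int × String) : List String :=
  if PySem.Int.mod iw.1 2 ≠ 0 then
    out.dropLast ++ [String.ofList ((out.getLastD "").toList ++ pvCap iw.2.toList)]
  else
    out ++ [iw.2]

def b1a_camelcase_pairs_alt (text : String) : String :=
  PySem.Str.join " " ((PySem.List.enumerate (PySem.Str.split₀ text) 0).foldl pvBStep [])

-- ===== PRECONDITION & SPEC =====
def Spec_b1a_camelcase_pairs (text : String) (out : String) : Prop := out = b1a_camelcase_pairs_alt text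
instance (text : String) (out : String) : Decidable (Spec_b1a_camelcase_pairs text out) := by unfold Spec_b1a_camelcase_pairs; infer_instance

-- ===== CLAIM (what is proved, stated in full; the proofs are below) =====
def Claim_equal_b1a_camelcase_pairs : Prop := ∀ (text : String), Dom_b1a_camelcase_pairs text → Spec_b1a_camelcase_pairs text (b1a_camelcase_pairs text)

-- ===== LEMMAS AND PROOFS =====
-- Invariant of B's fold: started at an even index k, the fold appends exactly A's pair-merged tokens.
theorem pvFold_eq (ws : List String) : ∀ (acc : List String) (k : Int), PySem.Int.mod k 2 = 0 →
    (PySem.List.enumerate ws k).foldl pvBStep acc = acc ++ pvALoop ws := by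
  induction ws using pvALoop.induct with
  | case1 => intro acc k _; simp [PySem.List.enumerate, pvALoop]
  | case2 w =>
    intro acc k hk
    simp only [PySem.List.enumerate, List.foldl, pvALoop, pvBStep, hk]
    simp
  | case3 a b t ih =>
    intro acc k hk
    rw [PySem.Int.mod_eq_emod_of_pos (by omega)] at hk
    have hk2 : PySem.Int.mod (k + 1 + 1) 2 = 0 := by
      rw [PySem.Int.mod_eq_emod_of_pos (by omega)]; omega
    simp only [PySem.List.enumerate_cons, List.foldl]
    rw [show pvBStep acc (k, a) = acc ++ [a] by
      simp [pvBStep]; intro h; exfalso; omega]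
    rw [show pvBStep (acc ++ [a]) (k + 1, b)
          = acc ++ [String.ofList (a.toList ++ pvCap b.toList)] by
      simp [pvBStep]; omega]
    rw [ih (acc ++ [String.ofList (a.toList ++ pvCap b.toList)]) (k + 1 + 1) hk2]
    simp [pvALoop]

-- ===== VERDICT (by name: the statement is the Claim_ definition above) =====
theorem b1a_camelcase_pairs_spec : Claim_equal_b1a_camelcase_pairs := by
  intro text _
  unfold Spec_b1a_camelcase_pairs b1a_camelcase_pairs b1a_camelcase_pairs_alt
  rw [pvFold_eq (PySem.Str.split₀ text) [] 0 (by decide)]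
  simp
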